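-- pv_equiv track=rewrite | github.com/Showerss/2.-Comp-120 | Lecture31-RecursiveBacktrack.py | shrinkable
-- ===== SOURCE A (Python) =====
-- def shrinkable(word: str, valid_words: list[str]) -> bool: #since this returns a bool the returns are just true/false
--     """ Returns True if word is shrinkable. """
--
--     if word not in valid_words:
--         return False
--     elif len(word) == 1:
--         return True
--
--     else:
--         for i in range(len(word)):
--             next_word = word[:i] + word[i+1:]
--             if shrinkable(next_word, valid_words):
--                 return True
--             # if next_word in valid_words:
--             #     return True
--         return False
-- ===== SOURCE B (Python) =====
-- def shrinkable(word: str, valid_words: list[str]) -> bool: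
--     """ Returns True if word is shrinkable. """
--     valid = set(valid_words)
--     memo = {}
--
--     def solve(w):
--         if w in memo:
--             return memo[w]
--         if w not in valid:
--             res = False
--         elif len(w) == 1:
--             res = True
--         else:
--             res = any(solve(w[:i] + w[i + 1:]) for i in range(len(w)))
--         memo[w] = res
--         return res
--
--     return solve(word)
-- ===== Notes on version B (the rewrite author's own statement) =====
-- stated objective: alternative
-- what changed: B replaces A's plain recursive backtracking with memoized recursion over distinct subwords plus a precomputed membership set, instead of re-exploring each subword once per deletion order.
import Mathlib
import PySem

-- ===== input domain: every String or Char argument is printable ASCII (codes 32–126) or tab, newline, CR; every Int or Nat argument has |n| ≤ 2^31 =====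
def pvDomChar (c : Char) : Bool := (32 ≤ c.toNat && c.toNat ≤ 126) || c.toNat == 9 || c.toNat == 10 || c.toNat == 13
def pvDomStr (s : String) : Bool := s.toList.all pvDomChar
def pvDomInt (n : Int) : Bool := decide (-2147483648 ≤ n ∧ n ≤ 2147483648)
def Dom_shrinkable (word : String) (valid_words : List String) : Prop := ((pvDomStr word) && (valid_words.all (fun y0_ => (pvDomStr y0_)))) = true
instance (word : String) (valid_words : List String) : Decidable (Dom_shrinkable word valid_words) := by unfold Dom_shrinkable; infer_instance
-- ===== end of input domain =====

-- B replaces A's plain recursive backtracking with memoized recursion over distinct subwords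
-- and a precomputed membership set, so each subword is explored once (objective: alternative).

-- ===== PORT A =====
-- w[:i] + w[i+1:]  (the one-character deletion both Pythons write)
def pySub (w : List Char) (i : Nat) : List Char :=
  PySem.List.slice w none (some (i : Int)) ++ PySem.List.slice w (some ((i : Int) + 1)) none

-- termination fact cited by both ports' decreasing_by
theorem pySub_eq (w : List Char) (i : Nat) : pySub w i = w.take i ++ w.drop (i + 1) := by
  have h : ((i : Int) + 1) = ((i + 1 : Nat) : Int) := by push_cast; ring
  rw [pySub, h, PySem.List.slice_to_natCast, PySem.List.slice_from_natCast]

theorem pySub_length_lt (w : List Char) (i : Nat) (hi : i < w.length) :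
    (pySub w i).length < w.length := by
  rw [pySub_eq]; simp [List.length_take, List.length_drop]; omega

def shrinkA (w : List Char) (vs : List (List Char)) : Bool :=
  if !(vs.contains w) then false
  else if w.length = 1 then true
  else (List.range w.length).attach.any (fun x => shrinkA (pySub w x.1) vs)
termination_by w.length
decreasing_by exact pySub_length_lt w x.1 (List.mem_range.mp x.2)

def shrinkable (word : String) (valid_words : List String) : Bool :=
  shrinkA word.toList (valid_words.map String.toList)

-- ===== PORT B =====
-- solve(w) with the memo dict threaded through; the foldl is Python's short-circuiting any()
def solveB (vset : PySem.Set (List Char)) (w : List Char)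
    (memo : PySem.Dict (List Char) Bool) : Bool × PySem.Dict (List Char) Bool :=
  match memo.get? w with
  | some b => (b, memo)
  | none =>
    let p :=
      if !(PySem.Set.contains vset w) then (false, memo)
      else if w.length = 1 then (true, memo)
      else (List.range w.length).attach.foldl
          (fun st x => if st.1 then st else solveB vset (pySub w x.1) st.2)
          (false, memo)
    (p.1, p.2.insert w p.1)
termination_by w.length
decreasing_by exact pySub_length_lt w x.1 (List.mem_range.mp x.2)

def shrinkable_alt (word : String) (valid_words : List String) : Bool :=
  (solveB (PySem.Set.ofList (valid_words.map String.toList)) word.toList PySem.Dict.empty).1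

-- ===== PRECONDITION & SPEC =====
def Spec_shrinkable (word : String) (valid_words : List String) (out : Bool) : Prop := out = shrinkable_alt word valid_words
instance (word : String) (valid_words : List String) (out : Bool) : Decidable (Spec_shrinkable word valid_words out) := by unfold Spec_shrinkable; infer_instance

-- ===== CLAIM (what is proved, stated in full; the proofs are below) =====
def Claim_equal_shrinkable : Prop := ∀ (word : String) (valid_words : List String), Dom_shrinkable word valid_words → Spec_shrinkable word valid_words (shrinkable word valid_words)

-- ===== LEMMAS AND PROOFS =====

-- every memo entry stores the naive answer
def GoodMemo (vs : List (List Char)) (memo : PySem.Dict (List Char) Bool) : Prop :=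
  ∀ k v, memo.get? k = some v → v = shrinkA k vs

theorem goodMemo_insert (vs : List (List Char)) (memo : PySem.Dict (List Char) Bool)
    (h : GoodMemo vs memo) (w : List Char) (b : Bool) (hb : b = shrinkA w vs) :
    GoodMemo vs (memo.insert w b) := by
  intro k v hk
  by_cases hkw : k = w
  · subst hkw
    rw [PySem.Dict.get?_insert_self] at hk
    cases hk; exact hb
  · rw [PySem.Dict.get?_insert_of_ne memo b hkw] at hk
    exact h k v hk

theorem set_ofList_contains (vs : List (List Char)) (w : List Char) :
    PySem.Set.contains (PySem.Set.ofList vs) w = vs.contains w := by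
  by_cases h : w ∈ vs
  · simp [PySem.Set.mem_ofList, h]
  · simp [PySem.Set.mem_ofList, h]

theorem solveB_spec (vs : List (List Char)) :
    ∀ n (w : List Char) (memo : PySem.Dict (List Char) Bool), w.length < n → GoodMemo vs memo →
      (solveB (PySem.Set.ofList vs) w memo).1 = shrinkA w vs ∧
        GoodMemo vs (solveB (PySem.Set.ofList vs) w memo).2 := by
  intro n
  induction n with
  | zero => intro w memo h; omega
  | succ n ih =>
    intro w memo hlen hgood
    -- the inner loop: the threaded short-circuiting foldl computes List.any of the naive answers
    have loop : ∀ (l : List {i // i ∈ List.range w.length})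
        (memo' : PySem.Dict (List Char) Bool) (b : Bool), GoodMemo vs memo' →
        (l.foldl (fun st x => if st.1 then st
            else solveB (PySem.Set.ofList vs) (pySub w x.1) st.2) (b, memo')).1
          = (b || l.any (fun x => shrinkA (pySub w x.1) vs)) ∧
        GoodMemo vs (l.foldl (fun st x => if st.1 then st
            else solveB (PySem.Set.ofList vs) (pySub w x.1) st.2) (b, memo')).2 := by
      intro l
      induction l with
      | nil => intro memo' b hg; exact ⟨by simp, hg⟩
      | cons x t iht =>
        intro memo' b hg
        cases hb : b with
        | true =>
          simpa [List.foldl_cons] using iht memo' true hg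
        | false =>
          have hstep : (if ((false : Bool), memo').1 = true then ((false : Bool), memo')
              else solveB (PySem.Set.ofList vs) (pySub w x.1) memo')
              = solveB (PySem.Set.ofList vs) (pySub w x.1) memo' := by simp
          have hx : (pySub w x.1).length < n := by
            have := pySub_length_lt w x.1 (List.mem_range.mp x.2)
            omega
          obtain ⟨h1, h2⟩ := ih (pySub w x.1) memo' hx hg
          obtain ⟨h3, h4⟩ :=
            iht (solveB (PySem.Set.ofList vs) (pySub w x.1) memo').2
              (solveB (PySem.Set.ofList vs) (pySub w x.1) memo').1 h2
          constructor
          · simp only [List.foldl_cons, hstep]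
            rw [h3, h1]
            simp [List.any_cons]
          · simpa only [List.foldl_cons, hstep] using h4
    rw [solveB]
    cases hget : memo.get? w with
    | some b =>
      exact ⟨hgood w b hget, hgood⟩
    | none =>
      by_cases hm : w ∈ vs
      · have hc : vs.contains w = true := List.contains_iff_mem.mpr hm
        by_cases h1 : w.length = 1
        · have hA : shrinkA w vs = true := by rw [shrinkA]; simp [hm, h1]
          simp only [set_ofList_contains, hc, h1]
          exact ⟨by simp [hA], goodMemo_insert vs memo hgood w true hA.symm⟩
        · have hA : shrinkA w vs
              = (List.range w.length).attach.any (fun x => shrinkA (pySub w x.1) vs) := by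
            rw [shrinkA]; simp [hm, h1]
          simp only [set_ofList_contains, hc, Bool.not_true, Bool.false_eq_true, if_false,
            if_neg h1]
          obtain ⟨hl1, hl2⟩ := loop (List.range w.length).attach memo false hgood
          rw [Bool.false_or] at hl1
          exact ⟨by rw [hl1, hA], goodMemo_insert vs _ hl2 w _ (by rw [hl1, hA])⟩
      · have hc : vs.contains w = false := by
          simpa using fun h => hm (List.contains_iff_mem.mp h)
        have hA : shrinkA w vs = false := by rw [shrinkA]; simp [hm]
        simp only [set_ofList_contains, hc]
        exact ⟨by simp [hA], goodMemo_insert vs memo hgood w false hA.symm⟩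

-- ===== VERDICT (by name: the statement is the Claim_ definition above) =====
theorem shrinkable_spec : Claim_equal_shrinkable := by
  intro word valid_words _
  unfold Spec_shrinkable shrinkable shrinkable_alt
  have := solveB_spec (valid_words.map String.toList)
    (word.toList.length + 1) word.toList PySem.Dict.empty (by omega)
    (by intro k v hk; simp [PySem.Dict.get?_empty] at hk)
  exact this.1.symm
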